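-- pv_equiv track=rewrite | github.com/nicholasjano/Leetcode-Solutions | Solutions/Python3/2414. Length of the Longest Alphabetical Continuous Substring/solution.py | longestContinuousSubstring
-- ===== SOURCE A (Python) =====
-- def longestContinuousSubstring(s: str) -> int:
--     longest = 1
--     current = 1
--     for i in range(1, len(s)):
--         if ord(s[i - 1]) - ord(s[i]) == -1:
--             current += 1
--             longest = max(longest, current)
--         else:
--             current = 1
--     return longest
-- ===== SOURCE B (Python) =====
-- def longestContinuousSubstring(s: str) -> int:
--     n = len(s)
--     breaks = [i for i in range(1, n) if ord(s[i]) - ord(s[i - 1]) != 1]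
--     bounds = [0] + breaks + [n]
--     seg_lengths = [bounds[j + 1] - bounds[j] for j in range(len(bounds) - 1)]
--     return max(seg_lengths + [1])
-- ===== Notes on version B (the rewrite author's own statement) =====
-- stated objective: alternative
-- what changed: Replaces A's inline running-max/current-counter scan with a two-phase build-then-reduce: collect all break indices where adjacent characters are not consecutive, partition the string into maximal alphabetical segments via the bounds list, and take the max of the segment lengths (seeded with 1).
import Mathlib
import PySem

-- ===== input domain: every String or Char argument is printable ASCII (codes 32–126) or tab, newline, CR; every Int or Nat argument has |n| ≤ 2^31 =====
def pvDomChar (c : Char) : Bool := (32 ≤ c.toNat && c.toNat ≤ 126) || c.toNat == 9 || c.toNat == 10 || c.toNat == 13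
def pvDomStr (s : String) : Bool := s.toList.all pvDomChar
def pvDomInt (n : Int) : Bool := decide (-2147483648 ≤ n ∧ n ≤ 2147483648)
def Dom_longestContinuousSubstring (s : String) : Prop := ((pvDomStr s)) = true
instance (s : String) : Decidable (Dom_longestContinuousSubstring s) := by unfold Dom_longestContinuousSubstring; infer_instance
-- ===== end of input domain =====

-- B replaces A's inline running-max scan with a build-then-reduce over break indices: collect the
-- indices where adjacent characters are not consecutive, partition into segments, take the max
-- segment length (seeded with 1); same result, an alternative decomposition (not faster).

-- ===== PORT A =====
-- all indices i in range(1, len(s)) are valid, so pyGetD with a dummy default is exact here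
def longestContinuousSubstring (s : String) : Int :=
  let cs := s.toList
  let st := (PySem.List.pyRange 1 (cs.length : Int) 1).foldl
    (fun (st : Int × Int) (i : Int) =>
      if ((PySem.List.pyGetD cs (i - 1) ' ').toNat : Int) - ((PySem.List.pyGetD cs i ' ').toNat : Int) = -1 then
        (max st.1 (st.2 + 1), st.2 + 1)
      else (st.1, 1))
    (1, 1)
  st.1

-- ===== PORT B =====
-- all indices used (i, i-1 into cs; j, j+1 into bounds) are valid, so pyGetD is exact here
def longestContinuousSubstring_alt (s : String) : Int :=
  let cs := s.toList
  let n : Int := cs.length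
  let breaks := (PySem.List.pyRange 1 n 1).filter
    (fun i => !(((PySem.List.pyGetD cs i ' ').toNat : Int) - ((PySem.List.pyGetD cs (i - 1) ' ').toNat : Int) == 1))
  let bounds := 0 :: (breaks ++ [n])
  let segLengths := (PySem.List.pyRange 0 ((bounds.length : Int) - 1) 1).map
    (fun j => PySem.List.pyGetD bounds (j + 1) 0 - PySem.List.pyGetD bounds j 0)
  (PySem.List.max? (segLengths ++ [1]) (fun x => x)).getD 0

-- ===== PRECONDITION & SPEC =====
def Spec_longestContinuousSubstring (s : String) (out : Int) : Prop := out = longestContinuousSubstring_alt s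
instance (s : String) (out : Int) : Decidable (Spec_longestContinuousSubstring s out) := by unfold Spec_longestContinuousSubstring; infer_instance

-- ===== CLAIM (what is proved, stated in full; the proofs are below) =====
def Claim_equal_longestContinuousSubstring : Prop := ∀ (s : String), Dom_longestContinuousSubstring s → Spec_longestContinuousSubstring s (longestContinuousSubstring s)

-- ===== LEMMAS AND PROOFS =====

-- the "adjacent pair is alphabetically consecutive" flag, and the flag list of a string
def pvFlag (p : Char × Char) : Bool := decide ((p.2.toNat : Int) - (p.1.toNat : Int) = 1)

def pvFlags (cs : List Char) : List Bool := (List.zip cs cs.tail).map pvFlag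

-- A's loop body, expressed on a flag
def pvStep (st : Int × Int) (b : Bool) : Int × Int :=
  if b then (max st.1 (st.2 + 1), st.2 + 1) else (st.1, 1)

-- segment lengths of a flag list, the first segment seeded with c
def pvSegs : Int → List Bool → List Int
  | c, [] => [c]
  | c, true :: bs => pvSegs (c + 1) bs
  | c, false :: bs => c :: pvSegs 1 bs

-- positions of the false flags, numbered from a
def pvFalsePos : List Bool → Int → List Int
  | [], _ => []
  | b :: bs, a => if b then pvFalsePos bs (a + 1) else a :: pvFalsePos bs (a + 1)

theorem pvSegs_cons (bs : List Bool) : ∀ c : Int, ∃ h t, pvSegs c bs = h :: t ∧ c ≤ h := by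
  induction bs with
  | nil => exact fun c => ⟨c, [], rfl, le_refl c⟩
  | cons b bs ih =>
    intro c
    cases b with
    | true =>
      obtain ⟨h, t, he, hle⟩ := ih (c + 1)
      exact ⟨h, t, he, by omega⟩
    | false => exact ⟨c, pvSegs 1 bs, rfl, le_refl c⟩

theorem pvFoldlMax_swap (l : List Int) : ∀ a b : Int, l.foldl max (max a b) = max a (l.foldl max b) := by
  induction l with
  | nil => intro a b; rfl
  | cons x l ih =>
    intro a b
    show l.foldl max (max (max a b) x) = max a (l.foldl max (max b x))
    rw [max_assoc, ih]

theorem pvFoldlMax_absorb (t : List Int) (x a h : Int) (hle : a ≤ h) :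
    (h :: t).foldl max (max x a) = (h :: t).foldl max x := by
  show t.foldl max (max (max x a) h) = t.foldl max (max x h)
  rw [max_assoc, max_eq_right hle]

theorem pvMain (bs : List Bool) : ∀ a c : Int, 1 ≤ c → c ≤ a →
    (bs.foldl pvStep (a, c)).1 = (pvSegs c bs).foldl max a := by
  induction bs with
  | nil =>
    intro a c _ hca
    show a = max a c
    omega
  | cons b bs ih =>
    intro a c hc hca
    cases b with
    | true =>
      show (bs.foldl pvStep (max a (c + 1), c + 1)).1 = (pvSegs (c + 1) bs).foldl max a
      rw [ih (max a (c + 1)) (c + 1) (by omega) (le_max_right _ _)]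
      obtain ⟨h, t, he, hle⟩ := pvSegs_cons bs (c + 1)
      rw [he, pvFoldlMax_absorb t a (c + 1) h hle]
    | false =>
      show (bs.foldl pvStep (a, 1)).1 = (c :: pvSegs 1 bs).foldl max a
      rw [ih a 1 le_rfl (by omega)]
      show _ = (pvSegs 1 bs).foldl max (max a c)
      rw [max_eq_left hca]

theorem pvDiffs (bs : List Bool) : ∀ c k : Int,
    (List.zip (k :: (pvFalsePos bs (k + c) ++ [k + c + (bs.length : Int)]))
       (pvFalsePos bs (k + c) ++ [k + c + (bs.length : Int)])).map (fun p => p.2 - p.1)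
      = pvSegs c bs := by
  induction bs with
  | nil =>
    intro c k
    simp [pvFalsePos, pvSegs]
  | cons b bs ih =>
    intro c k
    cases b with
    | true =>
      show (List.zip (k :: (pvFalsePos bs (k + c + 1) ++ [k + c + ((bs.length : Int) + 1)]))
              (pvFalsePos bs (k + c + 1) ++ [k + c + ((bs.length : Int) + 1)])).map (fun p => p.2 - p.1)
            = pvSegs (c + 1) bs
      have h1 : k + c + 1 = k + (c + 1) := by ring
      have h2 : k + c + ((bs.length : Int) + 1) = k + (c + 1) + (bs.length : Int) := by ring
      rw [h1, h2, ih (c + 1) k]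
    | false =>
      show (List.zip (k :: (k + c) :: (pvFalsePos bs (k + c + 1) ++ [k + c + ((bs.length : Int) + 1)]))
              ((k + c) :: (pvFalsePos bs (k + c + 1) ++ [k + c + ((bs.length : Int) + 1)]))).map (fun p => p.2 - p.1)
            = c :: pvSegs 1 bs
      have h1 : k + c + 1 = (k + c) + 1 := by ring
      have h2 : k + c + ((bs.length : Int) + 1) = (k + c) + 1 + (bs.length : Int) := by ring
      rw [List.zip_cons_cons, List.map_cons, h1, h2, ih 1 (k + c)]
      simp

-- map over range(0, len xs - 1) of the adjacent pair = zip xs xs.tail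
theorem pvRangeToPairs {α : Type} (xs : List α) (d : α) :
    (PySem.List.pyRange 0 ((xs.length : Int) - 1) 1).map
        (fun j => (PySem.List.pyGetD xs j d, PySem.List.pyGetD xs (j + 1) d))
      = List.zip xs xs.tail := by
  apply List.ext_getElem
  · simp only [List.length_map, PySem.List.length_pyRange_one, List.length_zip, List.length_tail]
    omega
  · intro i h1 h2
    have hi : i < xs.length - 1 := by
      simp only [List.length_map, PySem.List.length_pyRange_one] at h1
      omega
    rw [List.getElem_map, PySem.List.getElem_pyRange_one]
    have hr : (0 : Int) + (i : Int) = ((i : Nat) : Int) := by omega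
    rw [hr]
    have hr1 : ((i : Nat) : Int) + 1 = (((i + 1 : Nat)) : Int) := by push_cast; omega
    rw [hr1]
    rw [PySem.List.pyGetD_natCast, PySem.List.pyGetD_natCast]
    rw [List.getElem_zip]
    have h3 : i < xs.length := by omega
    have h4 : i + 1 < xs.length := by omega
    rw [List.getD_eq_getElem xs d h3, List.getD_eq_getElem xs d h4]
    rw [List.getElem_tail]

theorem pvRangeShift (n : Int) :
    PySem.List.pyRange 1 n 1 = (PySem.List.pyRange 0 (n - 1) 1).map (fun j => j + 1) := by
  rw [PySem.List.pyRange_one, PySem.List.pyRange_one, List.map_map]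
  have : n - 1 - 0 = n - 1 := by ring
  rw [this]
  apply List.map_congr_left
  intro k _
  simp
  omega

theorem pvFalsePosEq (bs : List Bool) : ∀ a : Int,
    ((List.range bs.length).filter (fun k => !bs.getD k true)).map (fun k : Nat => a + (k : Int))
      = pvFalsePos bs a := by
  induction bs with
  | nil => intro a; simp [pvFalsePos]
  | cons b bs ih =>
    intro a
    rw [List.length_cons, List.range_succ_eq_map, List.filter_cons]
    have hmap : List.filter (fun k => !(b :: bs).getD k true) (List.map Nat.succ (List.range bs.length))
        = List.map Nat.succ (List.filter (fun k => !bs.getD k true) (List.range bs.length)) := by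
      rw [List.filter_map]
      rfl
    have hcomp : List.map (fun k : Nat => a + (k : Int))
          (List.map Nat.succ (List.filter (fun k => !bs.getD k true) (List.range bs.length)))
        = pvFalsePos bs (a + 1) := by
      rw [List.map_map, ← ih (a + 1)]
      apply List.map_congr_left
      intro k _
      show a + ((k + 1 : Nat) : Int) = (a + 1) + (k : Int)
      push_cast
      ring
    cases b with
    | true =>
      simp only [List.getD_cons_zero, Bool.not_true, hmap, Bool.false_eq_true, if_false]
      rw [hcomp]
      rfl
    | false =>
      simp only [List.getD_cons_zero, Bool.not_false, hmap, if_true]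
      rw [List.map_cons, hcomp]
      show (a + ((0 : Nat) : Int)) :: _ = _
      norm_num
      rfl

-- A's port equals the flag-list fold
theorem pvA_eq (cs : List Char) :
    ((PySem.List.pyRange 1 (cs.length : Int) 1).foldl
      (fun (st : Int × Int) (i : Int) =>
        if ((PySem.List.pyGetD cs (i - 1) ' ').toNat : Int) - ((PySem.List.pyGetD cs i ' ').toNat : Int) = -1 then
          (max st.1 (st.2 + 1), st.2 + 1)
        else (st.1, 1))
      (1, 1))
    = (pvFlags cs).foldl pvStep (1, 1) := by
  rw [pvRangeShift, List.foldl_map]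
  refine Eq.trans (PySem.List.foldl_congr_mem _ _
      (fun (st : Int × Int) (j : Int) =>
        pvStep st (pvFlag (PySem.List.pyGetD cs j ' ', PySem.List.pyGetD cs (j + 1) ' '))) _ ?_) ?_
  · intro st j _
    show (if ((PySem.List.pyGetD cs (j + 1 - 1) ' ').toNat : Int) - ((PySem.List.pyGetD cs (j + 1) ' ').toNat : Int) = -1 then
        (max st.1 (st.2 + 1), st.2 + 1) else (st.1, 1))
      = pvStep st (pvFlag (PySem.List.pyGetD cs j ' ', PySem.List.pyGetD cs (j + 1) ' '))
    simp only [add_sub_cancel_right, pvStep, pvFlag, decide_eq_true_eq]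
    split_ifs with h1 h2 h2
    · rfl
    · exfalso; omega
    · exfalso; omega
    · rfl
  · have hm := (List.foldl_map
        (f := fun j : Int => (PySem.List.pyGetD cs j ' ', PySem.List.pyGetD cs (j + 1) ' '))
        (g := fun (st : Int × Int) (p : Char × Char) => pvStep st (pvFlag p))
        (l := PySem.List.pyRange 0 ((cs.length : Int) - 1) 1) (init := ((1 : Int), (1 : Int)))).symm
    refine Eq.trans hm ?_
    rw [pvRangeToPairs cs ' ']
    exact (List.foldl_map (f := pvFlag) (g := pvStep)
      (l := List.zip cs cs.tail) (init := ((1 : Int), (1 : Int)))).symm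

-- B's break-index filter equals the false-flag position list
theorem pvBreaks_eq (cs : List Char) :
    (PySem.List.pyRange 1 (cs.length : Int) 1).filter
      (fun i => !(((PySem.List.pyGetD cs i ' ').toNat : Int) - ((PySem.List.pyGetD cs (i - 1) ' ').toNat : Int) == 1))
    = pvFalsePos (pvFlags cs) 1 := by
  rw [pvRangeShift, List.filter_map, PySem.List.pyRange_one, List.filter_map]
  have hm : ((cs.length : Int) - 1 - 0).toNat = (pvFlags cs).length := by
    simp only [pvFlags, List.length_map, List.length_zip, List.length_tail]
    omega
  rw [hm]
  rw [List.filter_congr (q := fun k : Nat => !(pvFlags cs).getD k true) ?_]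
  · rw [← pvFalsePosEq (pvFlags cs) 1, List.map_map]
    apply List.map_congr_left
    intro k _
    show (0 : Int) + (k : Int) + 1 = 1 + (k : Int)
    omega
  · intro k hk
    rw [List.mem_range] at hk
    have hflen : (pvFlags cs).length = cs.length - 1 := by
      simp only [pvFlags, List.length_map, List.length_zip, List.length_tail]
      omega
    have hk1 : k < cs.length - 1 := by omega
    have h3 : k < cs.length := by omega
    have h4 : k + 1 < cs.length := by omega
    show (!(((PySem.List.pyGetD cs ((0 : Int) + (k : Int) + 1) ' ').toNat : Int)
          - ((PySem.List.pyGetD cs ((0 : Int) + (k : Int) + 1 - 1) ' ').toNat : Int) == 1))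
        = (!(pvFlags cs).getD k true)
    have e1 : (0 : Int) + (k : Int) + 1 = ((k + 1 : Nat) : Int) := by push_cast; omega
    rw [e1]
    rw [show ((k + 1 : Nat) : Int) - 1 = ((k : Nat) : Int) from by push_cast; omega]
    rw [PySem.List.pyGetD_natCast, PySem.List.pyGetD_natCast,
        List.getD_eq_getElem cs ' ' h3, List.getD_eq_getElem cs ' ' h4]
    have hgk : k < (pvFlags cs).length := by omega
    rw [List.getD_eq_getElem _ true hgk]
    simp only [pvFlags, List.getElem_map, List.getElem_zip, List.getElem_tail, pvFlag]
    rcases em (((cs[k + 1].toNat : Int) - (cs[k].toNat : Int)) = 1) with h | h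
    · simp [h]
    · simp [h]

-- B's adjacent-difference comprehension equals a map over zipped neighbours
theorem pvSegsPort_eq (bounds : List Int) :
    (PySem.List.pyRange 0 ((bounds.length : Int) - 1) 1).map
      (fun j => PySem.List.pyGetD bounds (j + 1) 0 - PySem.List.pyGetD bounds j 0)
    = (List.zip bounds bounds.tail).map (fun p : Int × Int => p.2 - p.1) := by
  have h1 : (PySem.List.pyRange 0 ((bounds.length : Int) - 1) 1).map
      (fun j => PySem.List.pyGetD bounds (j + 1) 0 - PySem.List.pyGetD bounds j 0)
      = ((PySem.List.pyRange 0 ((bounds.length : Int) - 1) 1).map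
          (fun j => (PySem.List.pyGetD bounds j 0, PySem.List.pyGetD bounds (j + 1) 0))).map
        (fun p : Int × Int => p.2 - p.1) := by
    rw [List.map_map]
    rfl
  rw [h1, pvRangeToPairs bounds 0]

-- ===== VERDICT (by name: the statement is the Claim_ definition above) =====
theorem longestContinuousSubstring_spec : Claim_equal_longestContinuousSubstring := by
  intro s _
  show longestContinuousSubstring s = longestContinuousSubstring_alt s
  unfold longestContinuousSubstring longestContinuousSubstring_alt
  simp only []
  generalize s.toList = cs
  rw [pvA_eq, pvMain (pvFlags cs) 1 1 le_rfl le_rfl, pvBreaks_eq, pvSegsPort_eq]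
  cases cs with
  | nil => decide
  | cons c cr =>
    have hflen : (pvFlags (c :: cr)).length = cr.length := by
      simp [pvFlags]
    have hd := pvDiffs (pvFlags (c :: cr)) 1 0
    rw [show (0 : Int) + 1 = 1 from by norm_num] at hd
    rw [show (1 : Int) + ((pvFlags (c :: cr)).length : Int) = (((c :: cr).length : Nat) : Int) from by
      rw [hflen, List.length_cons]; push_cast; omega] at hd
    simp only [List.tail_cons]
    rw [hd]
    obtain ⟨h, t, he, hle⟩ := pvSegs_cons (pvFlags (c :: cr)) 1
    rw [he, List.cons_append, PySem.List.max?_id_cons, Option.getD_some, List.foldl_append]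
    show t.foldl max (max 1 h) = List.foldl max (t.foldl max h) [1]
    rw [pvFoldlMax_swap t 1 h]
    show max 1 (t.foldl max h) = max (t.foldl max h) 1
    exact max_comm 1 _
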